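-- pv_equiv track=rewrite | github.com/jrimmer/sixtyfiveohtwo | provinggrounds/tools/dos33_extract.py | detokenize_applesoft
-- ===== SOURCE A (Python) =====
-- def detokenize_applesoft(data):
--     """Convert tokenized Applesoft BASIC to text."""
--     # Applesoft BASIC tokens
--     tokens = {
--         0x80: "END", 0x81: "FOR", 0x82: "NEXT", 0x83: "DATA",
--         0x84: "INPUT", 0x85: "DEL", 0x86: "DIM", 0x87: "READ",
--         0x88: "GR", 0x89: "TEXT", 0x8A: "PR#", 0x8B: "IN#",
--         0x8C: "CALL", 0x8D: "PLOT", 0x8E: "HLIN", 0x8F: "VLIN",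
--         0x90: "HGR2", 0x91: "HGR", 0x92: "HCOLOR=", 0x93: "HPLOT",
--         0x94: "DRAW", 0x95: "XDRAW", 0x96: "HTAB", 0x97: "HOME",
--         0x98: "ROT=", 0x99: "SCALE=", 0x9A: "SHLOAD", 0x9B: "TRACE",
--         0x9C: "NOTRACE", 0x9D: "NORMAL", 0x9E: "INVERSE", 0x9F: "FLASH",
--         0xA0: "COLOR=", 0xA1: "POP", 0xA2: "VTAB", 0xA3: "HIMEM:",
--         0xA4: "LOMEM:", 0xA5: "ONERR", 0xA6: "RESUME", 0xA7: "RECALL",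
--         0xA8: "STORE", 0xA9: "SPEED=", 0xAA: "LET", 0xAB: "GOTO",
--         0xAC: "RUN", 0xAD: "IF", 0xAE: "RESTORE", 0xAF: "&",
--         0xB0: "GOSUB", 0xB1: "RETURN", 0xB2: "REM", 0xB3: "STOP",
--         0xB4: "ON", 0xB5: "WAIT", 0xB6: "LOAD", 0xB7: "SAVE",
--         0xB8: "DEF", 0xB9: "POKE", 0xBA: "PRINT", 0xBB: "CONT",
--         0xBC: "LIST", 0xBD: "CLEAR", 0xBE: "GET", 0xBF: "NEW",
--         0xC0: "TAB(", 0xC1: "TO", 0xC2: "FN", 0xC3: "SPC(",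
--         0xC4: "THEN", 0xC5: "AT", 0xC6: "NOT", 0xC7: "STEP",
--         0xC8: "+", 0xC9: "-", 0xCA: "*", 0xCB: "/",
--         0xCC: "^", 0xCD: "AND", 0xCE: "OR", 0xCF: ">",
--         0xD0: "=", 0xD1: "<", 0xD2: "SGN", 0xD3: "INT",
--         0xD4: "ABS", 0xD5: "USR", 0xD6: "FRE", 0xD7: "SCRN(",
--         0xD8: "PDL", 0xD9: "POS", 0xDA: "SQR", 0xDB: "RND",
--         0xDC: "LOG", 0xDD: "EXP", 0xDE: "COS", 0xDF: "SIN",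
--         0xE0: "TAN", 0xE1: "ATN", 0xE2: "PEEK", 0xE3: "LEN",
--         0xE4: "STR$", 0xE5: "VAL", 0xE6: "ASC", 0xE7: "CHR$",
--         0xE8: "LEFT$", 0xE9: "RIGHT$", 0xEA: "MID$", 0xEB: "GO"
--     }
--
--     lines = []
--     pos = 0
--
--     # Skip load address (first 2 bytes for A files)
--     if len(data) < 2:
--         return ""
--
--     # Applesoft files start with a 2-byte load address, then program
--     pos = 0
--
--     while pos < len(data) - 4:
--         # Each line: 2 bytes next line addr, 2 bytes line number, tokens, 0x00
--         if pos + 4 > len(data):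
--             break
--
--         next_addr = data[pos] | (data[pos + 1] << 8)
--         if next_addr == 0:
--             break
--
--         line_num = data[pos + 2] | (data[pos + 3] << 8)
--         pos += 4
--
--         line_text = f"{line_num} "
--         in_string = False
--         in_rem = False
--         in_data = False
--
--         while pos < len(data) and data[pos] != 0:
--             byte = data[pos]
--
--             if in_string:
--                 if byte == 0x22:  # Quote
--                     in_string = False
--                 line_text += chr(byte & 0x7F)
--             elif in_rem or in_data:
--                 # REM and DATA statements are not tokenized
--                 line_text += chr(byte & 0x7F)
--             elif byte == 0x22:  # Quote
--                 in_string = True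
--                 line_text += '"'
--             elif byte >= 0x80 and byte in tokens:
--                 token = tokens[byte]
--                 line_text += token
--                 if token == "REM":
--                     in_rem = True
--                 elif token == "DATA":
--                     in_data = True
--             else:
--                 line_text += chr(byte & 0x7F)
--
--             pos += 1
--
--         pos += 1  # Skip the null terminator
--         lines.append(line_text)
--
--     return '\n'.join(lines)
-- ===== SOURCE B (Python) =====
-- def detokenize_applesoft(data):
--     """Convert tokenized Applesoft BASIC to text.
--
--     Segment-based: line bodies are cut out with list.index(0), quoted strings are
--     emitted as whole raw segments found with list.index(0x22), REM/DATA swallow the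
--     rest of the body in one slice, and tokens live in an indexed tuple; no per-byte
--     boolean state machine.
--     """
--     TOKENS = (
--         "END", "FOR", "NEXT", "DATA", "INPUT", "DEL", "DIM", "READ",
--         "GR", "TEXT", "PR#", "IN#", "CALL", "PLOT", "HLIN", "VLIN",
--         "HGR2", "HGR", "HCOLOR=", "HPLOT", "DRAW", "XDRAW", "HTAB", "HOME",
--         "ROT=", "SCALE=", "SHLOAD", "TRACE", "NOTRACE", "NORMAL", "INVERSE", "FLASH",
--         "COLOR=", "POP", "VTAB", "HIMEM:", "LOMEM:", "ONERR", "RESUME", "RECALL",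
--         "STORE", "SPEED=", "LET", "GOTO", "RUN", "IF", "RESTORE", "&",
--         "GOSUB", "RETURN", "REM", "STOP", "ON", "WAIT", "LOAD", "SAVE",
--         "DEF", "POKE", "PRINT", "CONT", "LIST", "CLEAR", "GET", "NEW",
--         "TAB(", "TO", "FN", "SPC(", "THEN", "AT", "NOT", "STEP",
--         "+", "-", "*", "/", "^", "AND", "OR", ">",
--         "=", "<", "SGN", "INT", "ABS", "USR", "FRE", "SCRN(",
--         "PDL", "POS", "SQR", "RND", "LOG", "EXP", "COS", "SIN",
--         "TAN", "ATN", "PEEK", "LEN", "STR$", "VAL", "ASC", "CHR$",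
--         "LEFT$", "RIGHT$", "MID$", "GO",
--     )
--
--     def raw(seg):
--         return "".join(chr(c & 0x7F) for c in seg)
--
--     def render(body):
--         out = []
--         i, m = 0, len(body)
--         while i < m:
--             b = body[i]
--             if b == 0x22:
--                 try:
--                     j = body.index(0x22, i + 1)
--                 except ValueError:
--                     j = m - 1
--                 out.append(raw(body[i:j + 1]))
--                 i = j + 1
--             elif 0x80 <= b <= 0xEB:
--                 tok = TOKENS[b - 0x80]
--                 out.append(tok)
--                 i += 1
--                 if tok == "REM" or tok == "DATA":
--                     out.append(raw(body[i:]))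
--                     i = m
--             else:
--                 out.append(chr(b & 0x7F))
--                 i += 1
--         return "".join(out)
--
--     n = len(data)
--     if n < 2:
--         return ""
--     lines = []
--     pos = 0
--     while pos < n - 4:
--         if data[pos] | (data[pos + 1] << 8) == 0:
--             break
--         line_num = data[pos + 2] | (data[pos + 3] << 8)
--         try:
--             z = data.index(0, pos + 4)
--             body, pos = data[pos + 4:z], z + 1
--         except ValueError:
--             body, pos = data[pos + 4:], n + 1
--         lines.append(f"{line_num} " + render(body))
--     return "\n".join(lines)
-- ===== Notes on version B (the rewrite author's own statement) =====
-- stated objective: faster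
-- what changed: A's per-byte state machine (in_string/in_rem/in_data booleans mutated inside one fused pointer walk with repeated line_text += concatenation) is replaced by segment consumption: line bodies are cut out with list.index(0) and one slice, quoted strings are emitted as whole raw segments found with list.index(0x22), REM/DATA swallow the rest of the body in one slice, tokens come from an indexed tuple instead of a dict, and each line is joined once from its segments.
import Mathlib
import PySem

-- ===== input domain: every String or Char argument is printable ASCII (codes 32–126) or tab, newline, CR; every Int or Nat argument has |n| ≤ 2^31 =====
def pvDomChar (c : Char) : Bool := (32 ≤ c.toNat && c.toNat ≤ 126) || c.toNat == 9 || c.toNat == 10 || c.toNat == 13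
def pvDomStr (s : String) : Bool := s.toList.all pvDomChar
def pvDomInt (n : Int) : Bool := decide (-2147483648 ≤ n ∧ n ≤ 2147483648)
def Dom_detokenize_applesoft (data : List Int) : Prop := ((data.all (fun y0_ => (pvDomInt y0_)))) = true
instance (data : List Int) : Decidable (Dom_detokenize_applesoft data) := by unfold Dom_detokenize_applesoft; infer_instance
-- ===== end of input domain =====

-- B replaces A's per-byte boolean state machine with segment consumption (bodies cut out
-- with index-of-0 and slices, quoted strings and REM/DATA tails emitted as whole raw
-- segments joined once, tokens in an indexed table); objective: faster (measured by the timing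
-- run: A's per-byte += concatenation degrades on long lines); return values proved equal.
-- Both outer-loop ports recurse on a fuel argument bounding the Python while loop
-- (a totality guard only; the loop condition is still checked at every step).

-- chr(b & 0x7F), as both Pythons write it
def pyChr7 (b : Int) : Char := Char.ofNat (PySem.Int.band b 127).toNat

-- ===== PORT A =====
-- A's token dictionary, verbatim
set_option maxRecDepth 8192 in
def applesoftTokens : PySem.Dict Int String := PySem.Dict.ofList [(128, "END"), (129, "FOR"), (130, "NEXT"), (131, "DATA"), (132, "INPUT"), (133, "DEL"), (134, "DIM"), (135, "READ"), (136, "GR"), (137, "TEXT"), (138, "PR#"), (139, "IN#"), (140, "CALL"), (141, "PLOT"), (142, "HLIN"), (143, "VLIN"), (144, "HGR2"), (145, "HGR"), (146, "HCOLOR="), (147, "HPLOT"), (148, "DRAW"), (149, "XDRAW"), (150, "HTAB"), (151, "HOME"), (152, "ROT="), (153, "SCALE="), (154, "SHLOAD"), (155, "TRACE"), (156, "NOTRACE"), (157, "NORMAL"), (158, "INVERSE"), (159, "FLASH"), (160, "COLOR="), (161, "POP"), (162, "VTAB"), (163, "HIMEM:"), (164, "LOMEM:"), (165, "ONERR"),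 (166, "RESUME"), (167, "RECALL"), (168, "STORE"), (169, "SPEED="), (170, "LET"), (171, "GOTO"), (172, "RUN"), (173, "IF"), (174, "RESTORE"), (175, "&"), (176, "GOSUB"), (177, "RETURN"), (178, "REM"), (179, "STOP"), (180, "ON"), (181, "WAIT"), (182, "LOAD"), (183, "SAVE"), (184, "DEF"), (185, "POKE"), (186, "PRINT"), (187, "CONT"), (188, "LIST"), (189, "CLEAR"), (190, "GET"), (191, "NEW"), (192, "TAB("), (193, "TO"), (194, "FN"), (195, "SPC("), (196, "THEN"), (197, "AT"), (198, "NOT"), (199, "STEP"), (200, "+"), (201, "-"), (202, "*"), (203, "/"), (204, "^"), (205, "AND"), (206, "OR"), (207, ">"), (208, "="), (209, "<"), (210, "SGN"), (211, "INT"), (212, "ABS"), (213, "USR"), (214, "FRE"), (215, "SCRN("), (216, "PDL"), (217, "POS"), (218, "SQR"), (219, "RND"), (220, "LOG"), (221, "EXP"), (222, "COS"), (223, "SIN"), (224, "TAN"), (225, "ATN"), (226, "PEEK"), (227, "LEN"), (228, "STR$"), (229, "VAL"), (230, "ASC"), (231, "CHR$"), (232, "LEFT$"), (233, "RIGHT$"),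 (234, "MID$"), (235, "GO")]

-- inner while loop of A: walks data from pos until a null byte or EOF, appending to line_text
def innerGo (data : List Int) : Nat → Nat → List Char → Bool → Bool → Bool → List Char × Nat
  | 0, pos, acc, _, _, _ => (acc, pos)
  | fuel + 1, pos, acc, instr, inrem, indata =>
    if pos < data.length ∧ data.getD pos 0 ≠ 0 then
      let byte := data.getD pos 0
      if instr then
        innerGo data fuel (pos + 1) (acc ++ [pyChr7 byte]) (!(byte == 34)) inrem indata
      else if inrem || indata then
        innerGo data fuel (pos + 1) (acc ++ [pyChr7 byte]) instr inrem indata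
      else if byte == 34 then
        innerGo data fuel (pos + 1) (acc ++ ['"']) true inrem indata
      else if 128 ≤ byte then
        match applesoftTokens.get? byte with
        | some token =>
          if token == "REM" then innerGo data fuel (pos + 1) (acc ++ token.toList) instr true indata
          else if token == "DATA" then innerGo data fuel (pos + 1) (acc ++ token.toList) instr inrem true
          else innerGo data fuel (pos + 1) (acc ++ token.toList) instr inrem indata
        | none => innerGo data fuel (pos + 1) (acc ++ [pyChr7 byte]) instr inrem indata
      else
        innerGo data fuel (pos + 1) (acc ++ [pyChr7 byte]) instr inrem indata
    else (acc, pos)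

-- outer while loop of A (accumulates the lines list)
def outerGo (data : List Int) : Nat → Nat → List (List Char) → List (List Char)
  | 0, _, lines => lines
  | fuel + 1, pos, lines =>
    if pos < data.length - 4 then
      if data.length < pos + 4 then lines
      else if PySem.Int.bor (data.getD pos 0) ((data.getD (pos + 1) 0) <<< 8) = 0 then lines
      else
        let line_num := PySem.Int.bor (data.getD (pos + 2) 0) ((data.getD (pos + 3) 0) <<< 8)
        let r := innerGo data (data.length - (pos + 4)) (pos + 4)
                   ((PySem.Int.toStr line_num).toList ++ [' ']) false false false
        outerGo data fuel (r.2 + 1) (lines ++ [r.1])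
    else lines

def detokenize_applesoft (data : List Int) : String :=
  if data.length < 2 then ""
  else String.ofList (PySem.Chars.join ['\n'] (outerGo data data.length 0 []))

-- ===== PORT B =====
-- B's token table (indexed by byte - 0x80)
def bTOKENS : List String := ["END", "FOR", "NEXT", "DATA", "INPUT", "DEL", "DIM", "READ", "GR", "TEXT", "PR#", "IN#", "CALL", "PLOT", "HLIN", "VLIN", "HGR2", "HGR", "HCOLOR=", "HPLOT", "DRAW", "XDRAW", "HTAB", "HOME", "ROT=", "SCALE=", "SHLOAD", "TRACE", "NOTRACE", "NORMAL", "INVERSE", "FLASH", "COLOR=", "POP", "VTAB", "HIMEM:", "LOMEM:", "ONERR", "RESUME", "RECALL", "STORE", "SPEED=", "LET", "GOTO", "RUN", "IF", "RESTORE", "&", "GOSUB", "RETURN", "REM", "STOP", "ON", "WAIT", "LOAD", "SAVE", "DEF", "POKE", "PRINT", "CONT", "LIST", "CLEAR", "GET", "NEW", "TAB(", "TO", "FN", "SPC(", "THEN", "AT", "NOT", "STEP", "+", "-", "*", "/", "^", "AND", "OR", ">", "=", "<", "SGN", "INT", "ABS", "USR", "FRE", "SCRN(", "PDL", "POS", "SQR",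 "RND", "LOG", "EXP", "COS", "SIN", "TAN", "ATN", "PEEK", "LEN", "STR$", "VAL", "ASC", "CHR$", "LEFT$", "RIGHT$", "MID$", "GO"]

-- raw(seg) = "".join(chr(c & 0x7F) for c in seg)
def rawSeg (seg : List Int) : List Char := seg.map pyChr7

-- render(body): consume whole segments (quoted string up to the closing quote found with
-- body.index(0x22, i+1), REM/DATA swallowing the rest, otherwise one byte); the index i of
-- the Python is transcribed as recursion on the suffix body[i:], the relative quote index j
-- giving the segment body[i:j+1] = take (j+2) and the continuation body[j+1:] = drop (j+1)
def renderSeg : List Int → List Char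
  | [] => []
  | b :: rest =>
    if b == 34 then
      match PySem.List.index? rest 34 with
      | some j => rawSeg ((b :: rest).take (j + 2)) ++ renderSeg (rest.drop (j + 1))
      | none => rawSeg (b :: rest)
    else if 128 ≤ b ∧ b ≤ 235 then
      let tok := bTOKENS.getD (b - 128).toNat ""
      if tok == "REM" || tok == "DATA" then tok.toList ++ rawSeg rest
      else tok.toList ++ renderSeg rest
    else pyChr7 b :: renderSeg rest
termination_by l => l.length
decreasing_by
  · simp [List.length_drop]
  · simp
  · simp

-- outer while loop of B: header check, body cut out with data.index(0, pos+4) and a slice;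
-- the search and the slice are transcribed relative to the tail data[pos+4:], which for the
-- non-negative pos is List.drop (pos+4) (PySem.List.slice_from_natCast): the absolute z of the
-- Python is pos+4+k, so body = tail.take k and the next pos z+1 is pos+5+k
def linesB (data : List Int) : Nat → Nat → List (List Char)
  | 0, _ => []
  | fuel + 1, pos =>
    if pos < data.length - 4 then
      if PySem.Int.bor (data.getD pos 0) ((data.getD (pos + 1) 0) <<< 8) = 0 then []
      else
        let line_num := PySem.Int.bor (data.getD (pos + 2) 0) ((data.getD (pos + 3) 0) <<< 8)
        let tail := data.drop (pos + 4)
        match PySem.List.index? tail 0 with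
        | some k =>
          ((PySem.Int.toStr line_num).toList ++ ' ' :: renderSeg (tail.take k))
            :: linesB data fuel (pos + 5 + k)
        | none =>
          ((PySem.Int.toStr line_num).toList ++ ' ' :: renderSeg tail)
            :: linesB data fuel (data.length + 1)
    else []

def detokenize_applesoft_alt (data : List Int) : String :=
  if data.length < 2 then ""
  else String.ofList (PySem.Chars.join ['\n'] (linesB data data.length 0))

-- ===== PRECONDITION & SPEC =====
def Spec_detokenize_applesoft (data : List Int) (out : String) : Prop := out = detokenize_applesoft_alt data
instance (data : List Int) (out : String) : Decidable (Spec_detokenize_applesoft data out) := by unfold Spec_detokenize_applesoft; infer_instance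

-- ===== CLAIM (what is proved, stated in full; the proofs are below) =====
def Claim_equal_detokenize_applesoft : Prop := ∀ (data : List Int), Dom_detokenize_applesoft data → Spec_detokenize_applesoft data (detokenize_applesoft data)

-- ===== LEMMAS AND PROOFS =====

-- Proof-side characterisation of A's fused inner loop: a per-byte three-mode machine
inductive RMode
  | norm | str | lit
deriving DecidableEq, Repr

def renderBody : List Int → RMode → List Char
  | [], _ => []
  | b :: rest, m =>
    match m with
    | .str => pyChr7 b :: renderBody rest (if b == 34 then .norm else .str)
    | .lit => pyChr7 b :: renderBody rest .lit
    | .norm =>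
      if b == 34 then '"' :: renderBody rest .str
      else if 128 ≤ b then
        match applesoftTokens.get? b with
        | some tok => tok.toList ++ renderBody rest (if tok == "REM" || tok == "DATA" then .lit else .norm)
        | none => pyChr7 b :: renderBody rest .norm
      else pyChr7 b :: renderBody rest .norm

-- Proof-side scan: the bytes A's inner loop consumes, with its stop position
def scanGo (data : List Int) : Nat → Nat → List Int × Nat
  | 0, pos => ([], pos)
  | fuel + 1, pos =>
    if pos < data.length ∧ data.getD pos 0 ≠ 0 then
      let r := scanGo data fuel (pos + 1)
      (data.getD pos 0 :: r.1, r.2)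
    else ([], pos)

set_option maxRecDepth 100000 in
theorem renderBody_nil (m : RMode) : renderBody [] m = [] := rfl

set_option maxRecDepth 100000 in
theorem renderBody_str (b : Int) (rest : List Int) :
    renderBody (b :: rest) .str = pyChr7 b :: renderBody rest (if b == 34 then .norm else .str) := rfl

set_option maxRecDepth 100000 in
theorem renderBody_lit (b : Int) (rest : List Int) :
    renderBody (b :: rest) .lit = pyChr7 b :: renderBody rest .lit := rfl

set_option maxRecDepth 100000 in
theorem renderBody_norm (b : Int) (rest : List Int) :
    renderBody (b :: rest) .norm =
      (if b == 34 then '"' :: renderBody rest .str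
       else if 128 ≤ b then
         match applesoftTokens.get? b with
         | some tok => tok.toList ++ renderBody rest (if tok == "REM" || tok == "DATA" then .lit else .norm)
         | none => pyChr7 b :: renderBody rest .norm
       else pyChr7 b :: renderBody rest .norm) := rfl

theorem scanGo_zero (data : List Int) (pos : Nat) : scanGo data 0 pos = ([], pos) := rfl

theorem scanGo_succ (data : List Int) (fuel pos : Nat) :
    scanGo data (fuel + 1) pos =
      (if pos < data.length ∧ data.getD pos 0 ≠ 0 then
        (data.getD pos 0 :: (scanGo data fuel (pos + 1)).1, (scanGo data fuel (pos + 1)).2)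
      else ([], pos)) := rfl

set_option maxRecDepth 100000 in
theorem innerGo_zero (data : List Int) (pos : Nat) (acc : List Char) (instr inrem indata : Bool) :
    innerGo data 0 pos acc instr inrem indata = (acc, pos) := rfl

set_option maxRecDepth 100000 in
theorem innerGo_succ (data : List Int) (fuel pos : Nat) (acc : List Char)
    (instr inrem indata : Bool) :
    innerGo data (fuel + 1) pos acc instr inrem indata =
      (if pos < data.length ∧ data.getD pos 0 ≠ 0 then
        (if instr then
          innerGo data fuel (pos + 1) (acc ++ [pyChr7 (data.getD pos 0)]) (!(data.getD pos 0 == 34)) inrem indata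
        else if inrem || indata then
          innerGo data fuel (pos + 1) (acc ++ [pyChr7 (data.getD pos 0)]) instr inrem indata
        else if data.getD pos 0 == 34 then
          innerGo data fuel (pos + 1) (acc ++ ['"']) true inrem indata
        else if 128 ≤ data.getD pos 0 then
          match applesoftTokens.get? (data.getD pos 0) with
          | some token =>
            if token == "REM" then innerGo data fuel (pos + 1) (acc ++ token.toList) instr true indata
            else if token == "DATA" then innerGo data fuel (pos + 1) (acc ++ token.toList) instr inrem true
            else innerGo data fuel (pos + 1) (acc ++ token.toList) instr inrem indata
          | none => innerGo data fuel (pos + 1) (acc ++ [pyChr7 (data.getD pos 0)]) instr inrem indata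
        else
          innerGo data fuel (pos + 1) (acc ++ [pyChr7 (data.getD pos 0)]) instr inrem indata)
      else (acc, pos)) := rfl

-- A's fused inner loop equals "scan the bytes, then render them" for every reachable flag state
set_option maxRecDepth 100000 in
theorem innerGo_eq_render (data : List Int) (fuel : Nat) :
    ∀ (pos : Nat) (acc : List Char) (instr inrem indata : Bool) (m : RMode),
      ((instr = true ∧ inrem = false ∧ indata = false ∧ m = .str) ∨
       (instr = false ∧ (inrem || indata) = true ∧ m = .lit) ∨
       (instr = false ∧ inrem = false ∧ indata = false ∧ m = .norm)) →
      innerGo data fuel pos acc instr inrem indata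
        = (acc ++ renderBody (scanGo data fuel pos).1 m, (scanGo data fuel pos).2) := by
  induction fuel with
  | zero =>
      intro pos acc instr inrem indata m _
      rw [innerGo_zero, scanGo_zero, renderBody_nil]
      simp
  | succ fuel ih =>
      intro pos acc instr inrem indata m hm
      rw [innerGo_succ, scanGo_succ]
      by_cases hc : pos < data.length ∧ data.getD pos 0 ≠ 0
      · rw [if_pos hc, if_pos hc]
        rcases hm with ⟨hs, hr, hd, rfl⟩ | ⟨hs, hrd, rfl⟩ | ⟨hs, hr, hd, rfl⟩
        · subst hs; subst hr; subst hd
          rw [if_pos rfl, renderBody_str]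
          by_cases hb : (data.getD pos 0 == 34) = true
          · rw [if_pos hb, ih _ _ _ _ _ .norm (Or.inr (Or.inr ⟨by simp_all, rfl, rfl, rfl⟩))]
            simp
          · rw [if_neg hb, ih _ _ _ _ _ .str (Or.inl ⟨by simp_all, rfl, rfl, rfl⟩)]
            simp
        · subst hs
          rw [if_neg (by simp), if_pos hrd, renderBody_lit]
          rw [ih _ _ _ _ _ .lit (Or.inr (Or.inl ⟨rfl, hrd, rfl⟩))]
          simp
        · subst hs; subst hr; subst hd
          rw [if_neg (by simp), if_neg (by simp)]
          by_cases hq : (data.getD pos 0 == 34) = true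
          · rw [if_pos hq, renderBody_norm, if_pos hq]
            rw [ih _ _ _ _ _ .str (Or.inl ⟨rfl, rfl, rfl, rfl⟩)]
            simp
          · rw [if_neg hq, renderBody_norm, if_neg hq]
            by_cases h128 : (128 : Int) ≤ data.getD pos 0
            · rw [if_pos h128, if_pos h128]
              cases hx : applesoftTokens.get? (data.getD pos 0) with
              | none =>
                  dsimp only
                  rw [ih _ _ _ _ _ .norm (Or.inr (Or.inr ⟨rfl, rfl, rfl, rfl⟩))]
                  simp
              | some token =>
                  dsimp only
                  by_cases hrem : (token == "REM") = true
                  · rw [if_pos hrem, if_pos (by simp [hrem])]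
                    rw [ih _ _ _ _ _ .lit (Or.inr (Or.inl ⟨rfl, rfl, rfl⟩))]
                    simp
                  · rw [if_neg hrem]
                    by_cases hdata : (token == "DATA") = true
                    · rw [if_pos hdata, if_pos (by simp [hdata])]
                      rw [ih _ _ _ _ _ .lit (Or.inr (Or.inl ⟨rfl, by simp, rfl⟩))]
                      simp
                    · rw [if_neg hdata, if_neg (by simp [hrem, hdata])]
                      rw [ih _ _ _ _ _ .norm (Or.inr (Or.inr ⟨rfl, rfl, rfl, rfl⟩))]
                      simp
            · rw [if_neg h128, if_neg h128]
              rw [ih _ _ _ _ _ .norm (Or.inr (Or.inr ⟨rfl, rfl, rfl, rfl⟩))]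
              simp
      · rw [if_neg hc, if_neg hc, renderBody_nil]
        simp

-- token-table correspondence: the dict agrees with B's indexed table on 0x80..0xEB …
set_option maxRecDepth 100000 in
theorem tok_lookup : ∀ k : Nat, k < 108 →
    applesoftTokens.get? (128 + (k : Int)) = some (bTOKENS.getD k "") := by decide

-- … and returns none above 0xEB (all dict keys lie in [128, 236))
set_option maxRecDepth 100000 in
theorem applesoftTokens_keys : applesoftTokens.keys = PySem.List.pyRange 128 236 1 := by decide

theorem tok_lookup_none (b : Int) (h : 236 ≤ b) : applesoftTokens.get? b = none := by
  rw [PySem.Dict.get?_eq_none_iff_not_mem_keys, applesoftTokens_keys,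
    PySem.List.mem_pyRange_one]
  omega

-- renderBody in literal mode is the raw segment
theorem pyChr7_quote : pyChr7 34 = '"' := by decide

theorem renderBody_lit_eq (body : List Int) : renderBody body .lit = rawSeg body := by
  induction body with
  | nil => rfl
  | cons b rest ih => rw [renderBody_lit, ih]; rfl

-- renderBody in string mode is the raw segment through the closing quote
theorem renderBody_str_eq (body : List Int) :
    renderBody body .str =
      (match PySem.List.index? body 34 with
       | some j => rawSeg (body.take (j + 1)) ++ renderBody (body.drop (j + 1)) .norm
       | none => rawSeg body) := by
  induction body with
  | nil => rfl
  | cons b rest ih =>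
      rw [renderBody_str]
      by_cases hb : b = 34
      · subst hb
        rw [PySem.List.index?_cons_self, if_pos (by decide)]
        simp [rawSeg]
      · rw [if_neg (by simp [hb]), ih, PySem.List.index?_cons_of_ne _ hb]
        cases h : PySem.List.index? rest 34 with
        | none => simp [rawSeg]
        | some j => simp [rawSeg]

-- B's segment renderer equals the per-byte machine in normal mode
theorem renderSeg_eq_renderBody (body : List Int) : renderSeg body = renderBody body .norm := by
  induction hn : body.length using Nat.strong_induction_on generalizing body with
  | _ n ih =>
    match body with
    | [] => rw [renderSeg, renderBody_nil]
    | b :: rest =>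
      rw [renderSeg, renderBody_norm]
      by_cases hb : (b == 34) = true
      · rw [if_pos hb, if_pos hb]
        have hb' : b = 34 := by simpa using hb
        subst hb'
        rw [renderBody_str_eq]
        cases h : PySem.List.index? rest 34 with
        | none => simp [rawSeg, pyChr7_quote]
        | some j =>
            dsimp only
            rw [ih ((rest.drop (j + 1)).length)
              (by simp only [List.length_drop, ← hn, List.length_cons]; omega) _ rfl]
            simp [rawSeg, pyChr7_quote]
      · rw [if_neg hb]
        by_cases h128 : (128 : Int) ≤ b
        · by_cases h235 : b ≤ 235
          · rw [if_pos ⟨h128, h235⟩, if_pos h128]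
            have hk : b = 128 + ((b - 128).toNat : Int) := by omega
            have hk108 : (b - 128).toNat < 108 := by omega
            have hget : applesoftTokens.get? b = some (bTOKENS.getD (b - 128).toNat "") := by
              have h := tok_lookup (b - 128).toNat hk108
              rw [← hk] at h
              exact h
            rw [hget]
            dsimp only
            by_cases hrd : (bTOKENS.getD (b - 128).toNat "" == "REM"
                || bTOKENS.getD (b - 128).toNat "" == "DATA") = true
            · rw [if_pos hrd, if_pos hrd, renderBody_lit_eq, if_neg hb]
            · rw [if_neg hrd, if_neg hrd,
                ih rest.length (by simp only [← hn, List.length_cons]; omega) _ rfl, if_neg hb]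
          · rw [if_neg (by simp [h235]), if_neg hb, if_pos h128, tok_lookup_none b (by omega)]
            rw [ih rest.length (by simp only [← hn, List.length_cons]; omega) _ rfl]
        · rw [if_neg (by simp [h128]), if_neg hb, if_neg h128]
          rw [ih rest.length (by simp only [← hn, List.length_cons]; omega) _ rfl]

-- A's inner scan, characterised by the first null byte of the tail
theorem scanGo_spec (data : List Int) :
    ∀ (fuel p : Nat), p ≤ data.length → data.length - p ≤ fuel →
      scanGo data fuel p =
        (match PySem.List.index? (data.drop p) 0 with
         | some k => ((data.drop p).take k, p + k)
         | none => (data.drop p, data.length)) := by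
  intro fuel
  induction fuel with
  | zero =>
      intro p hp hf
      have : p = data.length := by omega
      subst this
      simp [scanGo_zero, List.drop_of_length_le (le_refl _)]
  | succ fuel ih =>
      intro p hp hf
      rw [scanGo_succ]
      by_cases hlt : p < data.length
      · have hdrop : data.drop p = data[p] :: data.drop (p + 1) := (List.getElem_cons_drop hlt).symm
        have hgd : data.getD p 0 = data[p] := List.getD_eq_getElem data 0 hlt
        by_cases hz : data[p] = 0
        · rw [if_neg (by rw [hgd]; simp [hz]), hdrop, hz, PySem.List.index?_cons_self]
          simp
        · rw [if_pos ⟨hlt, by rw [hgd]; exact hz⟩]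
          rw [ih (p + 1) (by omega) (by omega), hdrop, PySem.List.index?_cons_of_ne _ hz]
          cases h : PySem.List.index? (data.drop (p + 1)) 0 with
          | none =>
              simp only [hgd, Option.map_none]
          | some k =>
              simp only [hgd, Option.map_some]
              rw [List.take_succ_cons]
              simp only [Prod.mk.injEq]
              refine ⟨by simp, by omega⟩
      · have hpe : p = data.length := by omega
        subst hpe
        rw [if_neg (by intro h; exact absurd h.1 (by omega))]
        simp [List.drop_of_length_le (le_refl _)]

theorem outerGo_stop (data : List Int) (fuel pos : Nat) (lines : List (List Char))
    (h : ¬ pos < data.length - 4) : outerGo data fuel pos lines = lines := by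
  cases fuel with
  | zero => rfl
  | succ fuel => rw [outerGo]; exact if_neg h

theorem linesB_stop (data : List Int) (fuel pos : Nat)
    (h : ¬ pos < data.length - 4) : linesB data fuel pos = [] := by
  cases fuel with
  | zero => rfl
  | succ fuel => rw [linesB]; exact if_neg h

set_option maxRecDepth 100000 in
theorem outerGo_succ (data : List Int) (fuel pos : Nat) (lines : List (List Char)) :
    outerGo data (fuel + 1) pos lines =
      (if pos < data.length - 4 then
        if data.length < pos + 4 then lines
        else if PySem.Int.bor (data.getD pos 0) ((data.getD (pos + 1) 0) <<< 8) = 0 then lines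
        else
          outerGo data fuel
            ((innerGo data (data.length - (pos + 4)) (pos + 4)
               ((PySem.Int.toStr (PySem.Int.bor (data.getD (pos + 2) 0) ((data.getD (pos + 3) 0) <<< 8))).toList ++ [' '])
               false false false).2 + 1)
            (lines ++ [(innerGo data (data.length - (pos + 4)) (pos + 4)
               ((PySem.Int.toStr (PySem.Int.bor (data.getD (pos + 2) 0) ((data.getD (pos + 3) 0) <<< 8))).toList ++ [' '])
               false false false).1])
      else lines) := rfl

theorem linesB_succ (data : List Int) (fuel pos : Nat) :
    linesB data (fuel + 1) pos =
      (if pos < data.length - 4 then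
        if PySem.Int.bor (data.getD pos 0) ((data.getD (pos + 1) 0) <<< 8) = 0 then []
        else
          match PySem.List.index? (data.drop (pos + 4)) 0 with
          | some k =>
            ((PySem.Int.toStr (PySem.Int.bor (data.getD (pos + 2) 0) ((data.getD (pos + 3) 0) <<< 8))).toList
                ++ ' ' :: renderSeg ((data.drop (pos + 4)).take k))
              :: linesB data fuel (pos + 5 + k)
          | none =>
            ((PySem.Int.toStr (PySem.Int.bor (data.getD (pos + 2) 0) ((data.getD (pos + 3) 0) <<< 8))).toList
                ++ ' ' :: renderSeg (data.drop (pos + 4)))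
              :: linesB data fuel (data.length + 1)
      else []) := rfl

-- A's outer loop produces exactly B's line list
set_option maxRecDepth 100000 in
theorem outerGo_eq_linesB (data : List Int) (fuel : Nat) :
    ∀ (pos : Nat) (lines : List (List Char)),
      outerGo data fuel pos lines = lines ++ linesB data fuel pos := by
  induction fuel with
  | zero => intro pos lines; simp [outerGo, linesB]
  | succ fuel ih =>
      intro pos lines
      rw [outerGo_succ, linesB_succ]
      by_cases h1 : pos < data.length - 4
      · rw [if_pos h1, if_pos h1, if_neg (by omega)]
        by_cases h3 : PySem.Int.bor (data.getD pos 0) ((data.getD (pos + 1) 0) <<< 8) = 0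
        · rw [if_pos h3, if_pos h3]; simp
        · rw [if_neg h3, if_neg h3]
          have hr := innerGo_eq_render data (data.length - (pos + 4)) (pos + 4)
            ((PySem.Int.toStr (PySem.Int.bor (data.getD (pos + 2) 0) ((data.getD (pos + 3) 0) <<< 8))).toList ++ [' '])
            false false false .norm (Or.inr (Or.inr ⟨rfl, rfl, rfl, rfl⟩))
          rw [hr]
          rw [scanGo_spec data (data.length - (pos + 4)) (pos + 4) (by omega) (by omega)]
          cases h : PySem.List.index? (data.drop (pos + 4)) 0 with
          | some k =>
              dsimp only
              rw [ih]
              have : pos + 4 + k + 1 = pos + 5 + k := by omega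
              rw [this, renderSeg_eq_renderBody]
              simp
          | none =>
              dsimp only
              rw [outerGo_stop data fuel (data.length + 1) _ (by omega),
                linesB_stop data fuel (data.length + 1) (by omega)]
              rw [renderSeg_eq_renderBody]
              simp
      · rw [if_neg h1, if_neg h1]; simp

-- ===== VERDICT (by name: the statement is the Claim_ definition above) =====
theorem detokenize_applesoft_spec : Claim_equal_detokenize_applesoft := by
  intro data _
  unfold Spec_detokenize_applesoft detokenize_applesoft detokenize_applesoft_alt
  by_cases hlen : data.length < 2
  · rw [if_pos hlen, if_pos hlen]
  · rw [if_neg hlen, if_neg hlen, outerGo_eq_linesB]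
    simp
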